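-- pv_equiv track=rewrite | github.com/yanoooooo/translation_ML | old/util/data.py | get_train_batch
-- ===== SOURCE A (Python) =====
-- import math
--
-- def get_train_batch(data, batch_size):
--     result = []
--     for index in range(0, math.ceil(len(data) / batch_size)):
--         tune = []
--         batch = data[index*batch_size:min([index*batch_size+batch_size, len(data)])]
--         max_length = max([len(st) for st in batch])
--         tune_flg = False
--         for j in range(max_length):
--             phrase = []
--             for s in batch:
--                 # 曲の区切りには空の配列を挿入
--                 if len(s) == 0:
--                     tune_flg = True
--                     continue
--                 if j < len(s):
--                     phrase.append(s[j])
--                 else: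
--                     phrase.append(None)
--             tune.append(phrase)
--             # tune.append([s[j] if j < len(s) else None for s in batch])
--         if tune_flg:
--             result.append([])
--         result.append(tune)
--     return result
-- ===== SOURCE B (Python) =====
-- def _transpose(cols):
--     # Recursive heads/tails transpose: emit the row of current heads (None for
--     # exhausted columns), recurse on the tails, until every column is exhausted.
--     if not any(cols):
--         return []
--     return [[c[0] if c else None for c in cols]] + _transpose([c[1:] for c in cols])
--
--
-- def get_train_batch(data, batch_size):
--     if batch_size <= 0:
--         return []
--     batch, rest = data[:batch_size], data[batch_size:]
--     if not batch:
--         return []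
--     tune = _transpose([s for s in batch if s])
--     sep = [[]] if tune and len(tune[0]) < len(batch) else []
--     return sep + [tune] + get_train_batch(rest, batch_size)
-- ===== Notes on version B (the rewrite author's own statement) =====
-- stated objective: alternative
-- what changed: A's counted index loops (ceil(len/bs) batch indices, a max_length-bounded j-loop with an empty-sentence flag and per-index padding) are replaced by structural recursion: the function peels data[:bs]/data[bs:] and recurses, and each batch is transposed by a recursive heads/tails sweep ([c[0] if c else None], then recurse on the tails) that terminates when every column is exhausted, with the [] separator decided by comparing the first row's width to the batch size.
-- outside the precondition, e.g. on get_train_batch([[1]], 0): A raises ZeroDivisionError, B returns []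
import Mathlib
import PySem

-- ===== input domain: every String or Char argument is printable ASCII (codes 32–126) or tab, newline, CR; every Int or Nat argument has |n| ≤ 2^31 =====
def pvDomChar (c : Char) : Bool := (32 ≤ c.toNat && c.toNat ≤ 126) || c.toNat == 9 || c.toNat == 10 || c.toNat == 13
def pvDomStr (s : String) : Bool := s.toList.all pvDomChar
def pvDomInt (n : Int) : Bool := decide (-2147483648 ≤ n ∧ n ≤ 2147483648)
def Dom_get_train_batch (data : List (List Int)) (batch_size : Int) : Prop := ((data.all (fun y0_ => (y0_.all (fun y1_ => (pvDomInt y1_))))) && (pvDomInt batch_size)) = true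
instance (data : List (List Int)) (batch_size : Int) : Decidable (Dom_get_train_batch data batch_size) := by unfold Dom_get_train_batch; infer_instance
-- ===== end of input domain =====

-- B replaces A's counted index loops by structural recursion (peel one batch, transpose it
-- by a recursive heads/tails sweep, recurse on the rest); same outputs, no speed claim.

-- ===== PORT A =====
-- math.ceil(len(data)/batch_size) is ported as the exact ceiling -((-n) // batch_size),
-- exact for every realizable list length.
def get_train_batch (data : List (List Int)) (batch_size : Int) : List (List (List (Option Int))) :=
  let n : Int := data.length
  (PySem.List.pyRange 0 (-(PySem.Int.floordiv (-n) batch_size)) 1).foldl (fun result index =>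
    let batch := PySem.List.slice data (some (index * batch_size))
                   (some (min (index * batch_size + batch_size) n))
    -- max([len(st) for st in batch]); batch is nonempty on every iteration reached
    let max_length : Int := (PySem.List.max? (batch.map (fun st => (st.length : Int))) id).getD 0
    let tf := (PySem.List.pyRange 0 max_length 1).foldl (fun tf j =>
        let pf := batch.foldl (fun (pf : List (Option Int) × Bool) s =>
            if s = [] then (pf.1, true)
            else if j < (s.length : Int) then (pf.1 ++ [PySem.List.pyGet? s j], pf.2)
            else (pf.1 ++ [(none : Option Int)], pf.2)) (([] : List (Option Int)), tf.2)
        (tf.1 ++ [pf.1], pf.2)) (([] : List (List (Option Int))), false)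
    if tf.2 then result ++ [[], tf.1] else result ++ [tf.1]) []

-- ===== PORT B =====
-- termination fact for the heads/tails transpose (cited by pvTranspose's decreasing_by)
lemma pvSumDropLt (cols : List (List Int)) (h : cols.any (fun c => !c.isEmpty) = true) :
    ((cols.map (fun c => c.drop 1)).map List.length).sum < (cols.map List.length).sum := by
  induction cols with
  | nil => simp at h
  | cons c t ih =>
    simp only [List.any_cons, Bool.or_eq_true] at h
    simp only [List.map_cons, List.sum_cons, List.length_drop]
    rcases h with h | h
    · have hc : c ≠ [] := by simpa using h
      have hlen : 0 < c.length := List.length_pos_iff.mpr hc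
      have hle : ((t.map (fun c => c.drop 1)).map List.length).sum ≤ (t.map List.length).sum := by
        clear ih h hc hlen
        induction t with
        | nil => simp
        | cons d u ihu => simp only [List.map_cons, List.sum_cons, List.length_drop]; omega
      omega
    · have := ih h; omega

-- _transpose(cols): emit [c[0] if c else None for c in cols], recurse on [c[1:] for c in cols]
def pvTranspose (cols : List (List Int)) : List (List (Option Int)) :=
  if h : cols.any (fun c => !c.isEmpty) = true then
    (cols.map (fun c => c.head?)) :: pvTranspose (cols.map (fun c => c.drop 1))
  else []
termination_by (cols.map List.length).sum
decreasing_by simpa using pvSumDropLt cols h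

-- the recursive body of B for a positive batch size; rest[:bs] / rest[bs:] are ported with
-- bs = k+1 (= batch_size.toNat, positive under the guard below), making the recursion on
-- rest structural
def pvGo (k : Nat) (rest : List (List Int)) : List (List (List (Option Int))) :=
  if h : (rest.take (k + 1)).isEmpty then []
  else
    let batch := rest.take (k + 1)
    let tune := pvTranspose (batch.filter (fun s => decide (s ≠ [])))
    let sep : List (List (List (Option Int))) :=
      if !tune.isEmpty && decide ((tune.headD []).length < batch.length) then [[]] else []
    sep ++ [tune] ++ pvGo k (rest.drop (k + 1))
termination_by rest.length
decreasing_by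
  have hne : rest ≠ [] := by
    intro he; subst he; simp at h
  have : 0 < rest.length := List.length_pos_iff.mpr hne
  simp only [List.length_drop]; omega

def get_train_batch_alt (data : List (List Int)) (batch_size : Int) : List (List (List (Option Int))) :=
  if batch_size ≤ 0 then [] else pvGo (batch_size.toNat - 1) data

-- ===== PRECONDITION & SPEC =====
-- Pre_ excludes only batch_size = 0, where A raises ZeroDivisionError.
def Pre_get_train_batch (data : List (List Int)) (batch_size : Int) : Prop := batch_size ≠ 0
instance (data : List (List Int)) (batch_size : Int) : Decidable (Pre_get_train_batch data batch_size) := by unfold Pre_get_train_batch; infer_instance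
def pvWitness_get_train_batch : List (List Int) × Int := ([[1, 2], [], [3]], 2)
def Spec_get_train_batch (data : List (List Int)) (batch_size : Int) (out : List (List (List (Option Int)))) : Prop := out = get_train_batch_alt data batch_size
instance (data : List (List Int)) (batch_size : Int) (out : List (List (List (Option Int)))) : Decidable (Spec_get_train_batch data batch_size out) := by unfold Spec_get_train_batch; infer_instance

-- ===== CLAIM (what is proved, stated in full; the proofs are below) =====
def Claim_equal_get_train_batch : Prop := ∀ (data : List (List Int)) (batch_size : Int), Dom_get_train_batch data batch_size → Pre_get_train_batch data batch_size → Spec_get_train_batch data batch_size (get_train_batch data batch_size)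

-- ===== LEMMAS AND PROOFS =====

-- the per-batch segment both programs emit, in B's shape (let-free for the proofs)
def pvSeg (batch : List (List Int)) : List (List (List (Option Int))) :=
  if !(pvTranspose (batch.filter (fun s => decide (s ≠ [])))).isEmpty
      && decide (((pvTranspose (batch.filter (fun s => decide (s ≠ [])))).headD []).length < batch.length)
  then [[], pvTranspose (batch.filter (fun s => decide (s ≠ [])))]
  else [pvTranspose (batch.filter (fun s => decide (s ≠ [])))]

-- row j of the padded transpose of ne
def pvRow (ne : List (List Int)) (j : Int) : List (Option Int) :=
  ne.map (fun s => if j < (s.length : Int) then PySem.List.pyGet? s j else none)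

-- max? seeded with a first element is the plain max-fold from that element
lemma pvMaxOfStart (t : List Int) : ∀ (a : Int),
    PySem.List.max? (a :: t) id = some (List.foldl (fun m x => if m < x then x else m) a t) := by
  induction t with
  | nil => intro a; rfl
  | cons b u ih =>
    intro a
    have h1 : PySem.List.max? (a :: b :: u) id = PySem.List.max? ((if a < b then b else a) :: u) id := by
      simp only [PySem.List.max?, List.foldl_cons, id]
      split <;> rfl
    rw [h1, ih, List.foldl_cons]

lemma pvFoldrMaxSwap (u : List Nat) : ∀ (a b : Nat),
    u.foldr max (max a b) = max a (u.foldr max b) := by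
  induction u with
  | nil => intro a b; rfl
  | cons y v ih => intro a b; simp only [List.foldr_cons, ih]; omega

lemma pvFoldlIfMax (t : List (List Int)) : ∀ (a : Nat),
    List.foldl (fun (m x : Int) => if m < x then x else m) (a : Int) (t.map (fun st => (st.length : Int)))
      = (((t.map List.length).foldr max a : Nat) : Int) := by
  induction t with
  | nil => intro a; rfl
  | cons x u ih =>
    intro a
    simp only [List.map_cons, List.foldl_cons, List.foldr_cons]
    have h1 : (if (a : Int) < (x.length : Int) then (x.length : Int) else (a : Int))
        = ((max a x.length : Nat) : Int) := by
      push_cast; omega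
    rw [h1, ih, Nat.max_comm a x.length, pvFoldrMaxSwap]

-- A's max([len(st) for st in batch]) (with default 0) is the Nat fold-max of the lengths
lemma pvMaxNat (cols : List (List Int)) :
    (PySem.List.max? (cols.map (fun st => (st.length : Int))) id).getD 0
      = (((cols.map List.length).foldr max 0 : Nat) : Int) := by
  cases cols with
  | nil => rfl
  | cons s t =>
    simp only [List.map_cons, List.foldr_cons]
    rw [pvMaxOfStart, Option.getD_some, pvFoldlIfMax]
    congr 1
    have h3 : (t.map List.length).foldr max s.length
        = (t.map List.length).foldr max (max s.length 0) := by rw [Nat.max_zero]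
    rw [h3, pvFoldrMaxSwap]

-- filtering out the empty sentences does not change the fold-max of the lengths
lemma pvFilterNatMax (l : List (List Int)) :
    (((l.filter (fun s => decide (s ≠ []))).map List.length).foldr max 0)
      = ((l.map List.length).foldr max 0) := by
  induction l with
  | nil => rfl
  | cons s t ih =>
    by_cases hs : s = []
    · subst hs; simpa using ih
    · simp only [List.filter_cons, hs, ne_eq, decide_true, not_false_eq_true, if_true,
        List.map_cons, List.foldr_cons, ih]

-- "some column still has an element" ↔ the fold-max of the lengths is positive
lemma pvAnyNonempty (cols : List (List Int)) :
    (cols.any (fun c => !c.isEmpty)) = decide (0 < (cols.map List.length).foldr max 0) := by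
  induction cols with
  | nil => simp
  | cons c t ih =>
    simp only [List.any_cons, List.map_cons, List.foldr_cons, ih]
    cases c with
    | nil => simp
    | cons x u =>
      simp only [List.isEmpty_cons, Bool.not_false, Bool.true_or, List.length_cons]
      symm; rw [decide_eq_true_eq]; omega

-- tails drop one from every length, so the fold-max drops by one (Nat-truncated)
lemma pvNatMaxTail (cols : List (List Int)) :
    ((cols.map (fun c => c.drop 1)).map List.length).foldr max 0
      = ((cols.map List.length).foldr max 0) - 1 := by
  induction cols with
  | nil => rfl
  | cons c t ih =>
    simp only [List.map_cons, List.foldr_cons, List.length_drop, ih]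
    omega

-- the heads/tails transpose is the index-by-index padded transpose
lemma pvTransposeEq (m : Nat) : ∀ (cols : List (List Int)),
    (cols.map List.length).foldr max 0 = m →
    pvTranspose cols = (List.range m).map (fun (j : Nat) =>
      cols.map (fun s => if (j : Int) < (s.length : Int) then PySem.List.pyGet? s (j : Int) else none)) := by
  induction m with
  | zero =>
    intro cols hm
    rw [pvTranspose]
    have hany : (cols.any (fun c => !c.isEmpty)) = false := by
      rw [pvAnyNonempty, hm]; simp
    simp [hany]
  | succ m' ih =>
    intro cols hm
    rw [pvTranspose]
    have hany : (cols.any (fun c => !c.isEmpty)) = true := by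
      rw [pvAnyNonempty, hm]; simp
    simp only [hany, dite_true]
    have htail : ((cols.map (fun c => c.drop 1)).map List.length).foldr max 0 = m' := by
      rw [pvNatMaxTail, hm]; omega
    rw [ih _ htail, List.range_succ_eq_map, List.map_cons]
    refine List.cons_eq_cons.mpr ⟨?_, ?_⟩
    · -- heads row = row 0
      apply List.map_congr_left
      intro s _
      cases s with
      | nil => simp
      | cons x u => simp
    · -- row j of the tails = row j+1 of cols
      rw [List.map_map]
      apply List.map_congr_left
      intro j _
      simp only [Function.comp_apply]
      rw [List.map_map]
      apply List.map_congr_left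
      intro s _
      simp only [Function.comp_apply]
      cases s with
      | nil => split_ifs <;> simp [PySem.List.pyGet?]
      | cons x u =>
        simp only [List.drop_succ_cons, List.drop_zero, List.length_cons, Nat.succ_eq_add_one]
        by_cases hj : (j : Int) < (u.length : Int)
        · rw [if_pos hj, if_pos (by push_cast; omega)]
          have hc : ((j + 1 : Nat) : Int) = ((j : Nat) : Int) + 1 := by push_cast; ring
          rw [hc, PySem.List.pyGet?_cons_succ]
        · rw [if_neg hj, if_neg (by push_cast; omega)]

-- pyRange 0 m 1 over a Nat bound, as a mapped List.range
lemma pvRangeNatCast (m : Nat) :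
    PySem.List.pyRange 0 (m : Int) 1 = (List.range m).map (fun (k : Nat) => (k : Int)) := by
  rw [PySem.List.pyRange_one]
  simp

-- A's inner phrase loop = filter-then-map, with the flag or-ed with "some sentence is empty"
lemma pvPhraseFold (j : Int) (l : List (List Int)) : ∀ (init : List (Option Int)) (flg : Bool),
    List.foldl (fun (pf : List (Option Int) × Bool) s =>
        if s = [] then (pf.1, true)
        else if j < (s.length : Int) then (pf.1 ++ [PySem.List.pyGet? s j], pf.2)
        else (pf.1 ++ [(none : Option Int)], pf.2)) (init, flg) l
      = (init ++ (l.filter (fun s => decide (s ≠ []))).map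
            (fun s => if j < (s.length : Int) then PySem.List.pyGet? s j else none),
         flg || l.any (fun s => decide (s = []))) := by
  induction l with
  | nil => intro init flg; simp
  | cons s t ih =>
    intro init flg
    by_cases hs : s = []
    · simp [hs, ih]
    · by_cases hj : j < (s.length : Int)
      · simp [hs, hj, ih]
      · simp [hs, hj, ih]

-- A's j-loop with a constant flag contribution e
lemma pvTuneFold (phrase : Int → List (Option Int)) (e : Bool) (L : List Int) :
    ∀ (t0 : List (List (Option Int))) (f0 : Bool),
    List.foldl (fun tf j => (tf.1 ++ [phrase j], tf.2 || e)) (t0, f0) L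
      = (t0 ++ L.map phrase, if L.isEmpty then f0 else f0 || e) := by
  induction L with
  | nil => intro t0 f0; simp
  | cons a t ih =>
    intro t0 f0
    simp only [List.foldl_cons, ih, List.map_cons, List.append_assoc, List.singleton_append,
      List.isEmpty_cons]
    cases t with
    | nil => simp
    | cons b u => simp

-- "some sentence is empty" ↔ "filtering dropped something"
lemma pvAnyEmpty (l : List (List Int)) :
    l.any (fun s => decide (s = []))
      = decide ((l.filter (fun s => decide (s ≠ []))).length < l.length) := by
  induction l with
  | nil => simp
  | cons s t ih =>
    by_cases hs : s = []
    · have hle := List.length_filter_le (fun s : List Int => decide (s ≠ [])) t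
      simp only [ne_eq] at hle
      simp only [List.any_cons, hs, decide_true, Bool.true_or, List.filter_cons,
        List.length_cons]
      simp only [ne_eq, not_true_eq_false, decide_false, Bool.false_eq_true, if_false]
      symm; rw [decide_eq_true_eq]; omega
    · simp [hs, ih]

-- the characterisation of pvSeg used per batch
lemma pvSegFin (acc : List (List (List (Option Int)))) (batch ne : List (List Int))
    (hne : ne = batch.filter (fun s => decide (s ≠ []))) (m : Nat)
    (hm : (ne.map List.length).foldr max 0 = m) :
    (if (if (PySem.List.pyRange 0 ((m : Nat) : Int) 1).isEmpty then false
         else batch.any (fun s => decide (s = [])))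
     then acc ++ [[], (PySem.List.pyRange 0 ((m : Nat) : Int) 1).map (pvRow ne)]
     else acc ++ [(PySem.List.pyRange 0 ((m : Nat) : Int) 1).map (pvRow ne)])
    = acc ++ pvSeg batch := by
  have htr : pvTranspose (batch.filter (fun s => decide (s ≠ [])))
      = (PySem.List.pyRange 0 ((m : Nat) : Int) 1).map (pvRow ne) := by
    rw [← hne, pvTransposeEq m ne hm, pvRangeNatCast, List.map_map]
    apply List.map_congr_left
    intro k _
    rfl
  unfold pvSeg
  rw [htr]
  have hany := pvAnyEmpty batch
  cases m with
  | zero =>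
    rw [show PySem.List.pyRange 0 ((0 : Nat) : Int) 1 = [] from
      PySem.List.pyRange_one_eq_nil (by simp)]
    simp
  | succ m'' =>
    rw [pvRangeNatCast, List.range_succ_eq_map, List.map_cons, List.map_cons]
    simp only [List.isEmpty_cons, Bool.not_false, Bool.true_and, List.headD_cons]
    rw [hany, ← hne]
    simp only [pvRow, List.length_map, Bool.false_eq_true, if_false]
    split <;> simp

-- the per-batch segment A appends equals B's pvSeg
lemma pvSegEq (acc : List (List (List (Option Int)))) (batch : List (List Int)) :
    (let max_length : Int := (PySem.List.max? (batch.map (fun st => (st.length : Int))) id).getD 0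
     let tf := (PySem.List.pyRange 0 max_length 1).foldl (fun tf j =>
         let pf := batch.foldl (fun (pf : List (Option Int) × Bool) s =>
             if s = [] then (pf.1, true)
             else if j < (s.length : Int) then (pf.1 ++ [PySem.List.pyGet? s j], pf.2)
             else (pf.1 ++ [(none : Option Int)], pf.2)) (([] : List (Option Int)), tf.2)
         (tf.1 ++ [pf.1], pf.2)) (([] : List (List (Option Int))), false)
     if tf.2 then acc ++ [[], tf.1] else acc ++ [tf.1])
    = acc ++ pvSeg batch := by
  have hmax : (PySem.List.max? (batch.map (fun st => (st.length : Int))) id).getD 0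
      = ((((batch.filter (fun s => decide (s ≠ []))).map List.length).foldr max 0 : Nat) : Int) := by
    rw [pvMaxNat, pvFilterNatMax]
  simp only []
  rw [hmax]
  have hfold : (PySem.List.pyRange 0 (((((batch.filter (fun s => decide (s ≠ []))).map List.length).foldr max 0 : Nat)) : Int) 1).foldl (fun tf j =>
      let pf := batch.foldl (fun (pf : List (Option Int) × Bool) s =>
          if s = [] then (pf.1, true)
          else if j < (s.length : Int) then (pf.1 ++ [PySem.List.pyGet? s j], pf.2)
          else (pf.1 ++ [(none : Option Int)], pf.2)) (([] : List (Option Int)), tf.2)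
      (tf.1 ++ [pf.1], pf.2)) (([] : List (List (Option Int))), false)
      = (([] : List (List (Option Int))) ++ (PySem.List.pyRange 0 (((((batch.filter (fun s => decide (s ≠ []))).map List.length).foldr max 0 : Nat)) : Int) 1).map
            (pvRow (batch.filter (fun s => decide (s ≠ [])))),
         if (PySem.List.pyRange 0 (((((batch.filter (fun s => decide (s ≠ []))).map List.length).foldr max 0 : Nat)) : Int) 1).isEmpty then false
         else false || batch.any (fun s => decide (s = []))) := by
    rw [← pvTuneFold (pvRow (batch.filter (fun s => decide (s ≠ []))))
        (batch.any (fun s => decide (s = [])))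
        (PySem.List.pyRange 0 (((((batch.filter (fun s => decide (s ≠ []))).map List.length).foldr max 0 : Nat)) : Int) 1) [] false]
    apply PySem.List.foldl_congr_mem
    intro acc' j _
    rw [pvPhraseFold j batch [] acc'.2]
    simp [pvRow]
  rw [hfold]
  simp only [List.nil_append, Bool.false_or]
  exact pvSegFin acc batch (batch.filter (fun s => decide (s ≠ []))) rfl _ rfl

-- both programs return [] when batch_size < 0 (A's range is empty)
lemma pvRangeNegA (n bs : Int) (hn : 0 ≤ n) (hbs : bs < 0) :
    PySem.List.pyRange 0 (-(PySem.Int.floordiv (-n) bs)) 1 = [] := by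
  apply PySem.List.pyRange_one_eq_nil
  have h : PySem.Int.floordiv (-n) bs = PySem.Int.floordiv n (-bs) := by
    rw [← PySem.Int.floordiv_neg_neg n (-bs)]; simp
  rw [h, PySem.Int.floordiv_eq_ediv_of_pos (by omega)]
  have := Int.ediv_nonneg hn (by omega : (0:Int) ≤ -bs)
  omega

-- the explicit min with len(data) in A's slice is already performed by slice's clamping
lemma pvSliceMin (xs : List (List Int)) (a b : Int) (ha : 0 ≤ a) (hb : 0 ≤ b) :
    PySem.List.slice xs (some a) (some (min b (xs.length : Int)))
      = PySem.List.slice xs (some a) (some b) := by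
  have hm : 0 ≤ min b (xs.length : Int) := by positivity
  rw [PySem.List.slice_toNat xs ha hb, PySem.List.slice_toNat xs ha hm]
  by_cases h : b ≤ (xs.length : Int)
  · rw [min_eq_left h]
  · rw [min_eq_right (by omega : (xs.length : Int) ≤ b)]
    have h1 : (xs.drop a.toNat).length ≤ ((xs.length : Int).toNat - a.toNat) := by
      simp [List.length_drop]
    have h2 : (xs.drop a.toNat).length ≤ (b.toNat - a.toNat) := by
      simp only [List.length_drop]; omega
    rw [List.take_of_length_le h1, List.take_of_length_le h2]

-- chunk 0 of a slice-based batching is take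
lemma pvSliceChunk0 (xs : List (List Int)) (bs : Int) (hbs : 0 < bs) :
    PySem.List.slice xs (some (0 * bs)) (some (0 * bs + bs)) = xs.take bs.toNat := by
  rw [zero_mul, zero_add, PySem.List.slice_toNat xs le_rfl hbs.le]
  simp

-- chunk i+1 of xs is chunk i of xs with the first batch dropped
lemma pvSliceShift (xs : List (List Int)) (bs i : Int) (hbs : 0 < bs) (hi : 0 ≤ i) :
    PySem.List.slice xs (some ((i + 1) * bs)) (some ((i + 1) * bs + bs))
      = PySem.List.slice (xs.drop bs.toNat) (some (i * bs)) (some (i * bs + bs)) := by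
  have hib : 0 ≤ i * bs := mul_nonneg hi hbs.le
  have h1 : (i + 1) * bs = i * bs + bs := by ring
  rw [h1, PySem.List.slice_toNat xs (by omega) (by omega),
      PySem.List.slice_toNat (xs.drop bs.toNat) (by omega) (by omega),
      List.drop_drop]
  have e3 : bs.toNat + (i * bs).toNat = (i * bs + bs).toNat := by omega
  rw [e3]
  congr 1
  omega

-- unfolding pvGo one batch at a time
lemma pvGoNil (k : Nat) : pvGo k [] = [] := by
  rw [pvGo]; simp

lemma pvGoCons (k : Nat) (rest : List (List Int)) (h : rest ≠ []) :
    pvGo k rest = pvSeg (rest.take (k + 1)) ++ pvGo k (rest.drop (k + 1)) := by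
  rw [pvGo]
  have hne : ¬ (rest.take (k + 1)).isEmpty = true := by
    cases rest with
    | nil => exact absurd rfl h
    | cons a t => simp [List.take_succ_cons]
  rw [dif_neg hne]
  unfold pvSeg
  simp only []
  split <;> simp

-- the ceiling count of the remaining chunks
lemma pvCeilStep (n : Nat) (bs : Int) (hbs : 0 < bs) (hn : 0 < n) :
    (-(PySem.Int.floordiv (-((n - bs.toNat : Nat) : Int)) bs))
      = (-(PySem.Int.floordiv (-(n : Int)) bs)) - 1 := by
  set c := -(PySem.Int.floordiv (-(n : Int)) bs) with hc
  have hbr := (PySem.Int.neg_floordiv_neg_eq_iff_of_pos hbs).mp hc.symm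
  have hn' : (0 : Int) < (n : Int) := by exact_mod_cast hn
  have hbn : (bs.toNat : Int) = bs := Int.toNat_of_nonneg hbs.le
  by_cases hle : n ≤ bs.toNat
  · have h0 : n - bs.toNat = 0 := by omega
    have hc1 : c = 1 := by
      have hnb : (n : Int) ≤ bs := by
        have : (n : Int) ≤ (bs.toNat : Int) := by exact_mod_cast hle
        omega
      nlinarith [hbr.1, hbr.2]
    rw [h0, hc1]
    simp only [Nat.cast_zero, neg_zero]
    rw [PySem.Int.floordiv_eq_ediv_of_pos hbs]
    simp
  · have hcast : ((n - bs.toNat : Nat) : Int) = (n : Int) - bs := by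
      rw [Nat.cast_sub (by omega), hbn]
    rw [hcast]
    rw [PySem.Int.neg_floordiv_neg_eq_iff_of_pos hbs]
    constructor
    · nlinarith [hbr.1]
    · nlinarith [hbr.2]

lemma pvCeilPos (n : Nat) (bs : Int) (hbs : 0 < bs) (hn : 0 < n) :
    0 < -(PySem.Int.floordiv (-(n : Int)) bs) := by
  set c := -(PySem.Int.floordiv (-(n : Int)) bs) with hc
  have hbr := (PySem.Int.neg_floordiv_neg_eq_iff_of_pos hbs).mp hc.symm
  have hn' : (0 : Int) < (n : Int) := by exact_mod_cast hn
  by_contra h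
  have h' : c ≤ 0 := by omega
  have : c * bs ≤ 0 * bs := mul_le_mul_of_nonneg_right h' hbs.le
  simp only [zero_mul] at this
  linarith [hbr.2]

-- the main induction: A's slice-based fold over the chunk indices is pvGo
lemma pvMain (bs : Int) (hbs : 0 < bs) : ∀ (N : Nat) (data : List (List Int)), data.length ≤ N →
    ∀ (acc : List (List (List (Option Int)))),
    (PySem.List.pyRange 0 (-(PySem.Int.floordiv (-(data.length : Int)) bs)) 1).foldl
      (fun result index => result ++ pvSeg (PySem.List.slice data (some (index * bs)) (some (index * bs + bs)))) acc
      = acc ++ pvGo (bs.toNat - 1) data := by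
  intro N
  induction N with
  | zero =>
    intro data hlen acc
    have hdata : data = [] := List.length_eq_zero_iff.mp (by omega)
    subst hdata
    rw [pvGoNil]
    simp only [List.length_nil, Nat.cast_zero, neg_zero]
    rw [show PySem.Int.floordiv 0 bs = 0 from by
      rw [PySem.Int.floordiv_eq_ediv_of_pos hbs]; simp]
    rw [neg_zero, PySem.List.pyRange_one_eq_nil le_rfl]
    simp
  | succ N ih =>
    intro data hlen acc
    by_cases hdata : data = []
    · subst hdata
      rw [pvGoNil]
      simp only [List.length_nil, Nat.cast_zero, neg_zero]
      rw [show PySem.Int.floordiv 0 bs = 0 from by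
        rw [PySem.Int.floordiv_eq_ediv_of_pos hbs]; simp]
      rw [neg_zero, PySem.List.pyRange_one_eq_nil le_rfl]
      simp
    · have hnpos : 0 < data.length := List.length_pos_iff.mpr hdata
      have hcpos := pvCeilPos data.length bs hbs hnpos
      rw [PySem.List.pyRange_one_cons hcpos, List.foldl_cons]
      rw [pvSliceChunk0 data bs hbs]
      have hr : PySem.List.pyRange (0 + 1) (-(PySem.Int.floordiv (-((data.length : Nat) : Int)) bs)) 1
          = (PySem.List.pyRange 0 (-(PySem.Int.floordiv (-((data.length : Nat) : Int)) bs) - 1) 1).map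
              (fun i => i + 1) := by
        rw [PySem.List.pyRange_one, PySem.List.pyRange_one, List.map_map]
        rw [show (-(PySem.Int.floordiv (-((data.length : Nat) : Int)) bs)) - (0 + 1)
            = (-(PySem.Int.floordiv (-((data.length : Nat) : Int)) bs) - 1) - 0 from by ring]
        apply List.map_congr_left
        intro k _
        simp only [Function.comp_apply]
        ring
      rw [hr, List.foldl_map]
      have hstep : (PySem.List.pyRange 0 (-(PySem.Int.floordiv (-((data.length : Nat) : Int)) bs) - 1) 1).foldl
          (fun result i => result ++ pvSeg (PySem.List.slice data (some ((i + 1) * bs)) (some ((i + 1) * bs + bs))))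
          (acc ++ pvSeg (data.take bs.toNat))
          = (PySem.List.pyRange 0 (-(PySem.Int.floordiv (-((data.length : Nat) : Int)) bs) - 1) 1).foldl
              (fun result i => result ++ pvSeg (PySem.List.slice (data.drop bs.toNat) (some (i * bs)) (some (i * bs + bs))))
              (acc ++ pvSeg (data.take bs.toNat)) := by
        apply PySem.List.foldl_congr_mem
        intro a i hi
        have hi0 : 0 ≤ i := (PySem.List.mem_pyRange_one.mp hi).1
        rw [pvSliceShift data bs i hbs hi0]
      rw [hstep]
      have hcr : -(PySem.Int.floordiv (-((data.length : Nat) : Int)) bs) - 1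
          = -(PySem.Int.floordiv (-(((data.drop bs.toNat).length : Nat) : Int)) bs) := by
        rw [List.length_drop]
        exact (pvCeilStep data.length bs hbs hnpos).symm
      rw [hcr]
      rw [ih (data.drop bs.toNat) (by simp only [List.length_drop]; omega)
          (acc ++ pvSeg (data.take bs.toNat))]
      rw [pvGoCons (bs.toNat - 1) data hdata]
      have hk : bs.toNat - 1 + 1 = bs.toNat := by omega
      rw [hk, List.append_assoc]

-- ===== VERDICT (by name: the statement is the Claim_ definition above) =====
theorem get_train_batch_spec : Claim_equal_get_train_batch := by
  intro data bs _ hpre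
  unfold Spec_get_train_batch get_train_batch get_train_batch_alt
  simp only []
  rcases lt_or_gt_of_ne hpre with hneg | hpos
  · rw [pvRangeNegA (data.length : Int) bs (by positivity) hneg, if_pos hneg.le]
    rfl
  · rw [if_neg (by omega)]
    have hstep : (PySem.List.pyRange 0 (-(PySem.Int.floordiv (-(data.length : Int)) bs)) 1).foldl
        (fun result index =>
          let batch := PySem.List.slice data (some (index * bs))
                         (some (min (index * bs + bs) (data.length : Int)))
          let max_length : Int := (PySem.List.max? (batch.map (fun st => (st.length : Int))) id).getD 0
          let tf := (PySem.List.pyRange 0 max_length 1).foldl (fun tf j =>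
              let pf := batch.foldl (fun (pf : List (Option Int) × Bool) s =>
                  if s = [] then (pf.1, true)
                  else if j < (s.length : Int) then (pf.1 ++ [PySem.List.pyGet? s j], pf.2)
                  else (pf.1 ++ [(none : Option Int)], pf.2)) (([] : List (Option Int)), tf.2)
              (tf.1 ++ [pf.1], pf.2)) (([] : List (List (Option Int))), false)
          if tf.2 then result ++ [[], tf.1] else result ++ [tf.1]) []
        = (PySem.List.pyRange 0 (-(PySem.Int.floordiv (-(data.length : Int)) bs)) 1).foldl
            (fun result index => result ++ pvSeg (PySem.List.slice data (some (index * bs)) (some (index * bs + bs)))) [] := by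
      apply PySem.List.foldl_congr_mem
      intro acc i hi
      have hi0 : 0 ≤ i := (PySem.List.mem_pyRange_one.mp hi).1
      rw [pvSliceMin data _ _ (mul_nonneg hi0 hpos.le) (by nlinarith)]
      exact pvSegEq acc _
    rw [hstep, pvMain bs hpos data.length data le_rfl []]
    simp
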